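-- pv_equiv track=rewrite | github.com/rfc391/SPC | src/spc.py | spc_encode_message
-- ===== SOURCE A (Python) =====
-- def spc_encode_message(message, key_numbers, formatting):
--     encoded_message = []
--     for char in message:
--         if char.isalpha():
--             value = ord(char.upper()) - 64
--             encoded_message.append(str(value))
--         else:
--             encoded_message.append(char)
--     for key in key_numbers:
--         encoded_message.insert(len(encoded_message) // 2, str(key))
--     if formatting.get("commas"):
--         encoded_message = [",".join(encoded_message)]
--     if formatting.get("periods"):
--         encoded_message.append(".")
--     return " ".join(encoded_message)
-- ===== SOURCE B (Python) =====
-- def spc_encode_message(message, key_numbers, formatting):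
--     encoded = [str(ord(c.upper()) - 64) if c.isalpha() else c for c in message]
--     # place the keys directly: they end up as one contiguous block at the middle;
--     # keys landing on an odd current length go to the block's front (in order),
--     # the others to its back (reversed) -- O(n + k) instead of A's O((n + k) * k)
--     odd = len(encoded) % 2 == 1
--     front, back = [], []
--     for k in key_numbers:
--         (front if odd else back).append(str(k))
--         odd = not odd
--     half = len(encoded) // 2
--     out = encoded[:half] + front + back[::-1] + encoded[half:]
--     if formatting.get("commas"):
--         out = [",".join(out)]
--     if formatting.get("periods"):
--         out.append(".")
--     return " ".join(out)
-- ===== Notes on version B (the rewrite author's own statement) =====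
-- stated objective: faster
-- what changed: Replaces A's repeated list.insert at the running middle with a single pass that splits the keys into the block's front/back halves by length parity and splices that block between the two fixed halves of the encoded list.
import Mathlib
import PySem

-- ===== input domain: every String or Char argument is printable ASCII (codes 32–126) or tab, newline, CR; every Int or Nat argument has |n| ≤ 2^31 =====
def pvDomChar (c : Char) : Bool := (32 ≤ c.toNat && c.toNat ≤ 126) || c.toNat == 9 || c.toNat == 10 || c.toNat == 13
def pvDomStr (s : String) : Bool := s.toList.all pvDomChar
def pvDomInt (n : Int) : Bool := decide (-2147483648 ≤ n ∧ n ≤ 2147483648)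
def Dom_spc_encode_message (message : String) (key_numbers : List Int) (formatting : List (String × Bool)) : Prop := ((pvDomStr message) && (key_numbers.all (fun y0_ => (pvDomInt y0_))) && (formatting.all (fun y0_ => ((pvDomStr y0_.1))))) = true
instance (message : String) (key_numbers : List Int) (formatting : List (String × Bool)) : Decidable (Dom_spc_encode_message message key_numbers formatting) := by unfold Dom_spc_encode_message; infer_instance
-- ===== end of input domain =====

-- B replaces A's repeated list.insert at the middle (O((n+k)·k)) by computing the keys'
-- contiguous middle block directly in one pass (O(n+k)); same return value everywhere.

-- ===== PORT A =====
-- 'str(ord(char.upper()) - 64)' if alpha else the char itself (exact on the ASCII domain)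
def pvEncCharA (c : Char) : String :=
  if PySem.Chars.isalpha c then PySem.Int.toStr ((PySem.Chars.upperChar c).toNat - 64 : Int)
  else String.ofList [c]

def spc_encode_message (message : String) (key_numbers : List Int) (formatting : List (String × Bool)) : String :=
  -- for char in message: … append …
  let encoded := message.toList.foldl (fun acc c => acc ++ [pvEncCharA c]) []
  -- for key in key_numbers: encoded.insert(len(encoded)//2, str(key))
  let encoded := key_numbers.foldl
    (fun acc k => PySem.List.insert acc (PySem.Int.floordiv (acc.length : Int) 2) (PySem.Int.toStr k)) encoded
  let encoded := if (PySem.Dict.mk formatting).getD "commas" false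
                 then [PySem.Str.join "," encoded] else encoded
  let encoded := if (PySem.Dict.mk formatting).getD "periods" false
                 then encoded ++ ["."] else encoded
  PySem.Str.join " " encoded

-- ===== PORT B =====
def pvEncCharB (c : Char) : String :=
  if PySem.Chars.isalpha c then PySem.Int.toStr ((PySem.Chars.upperChar c).toNat - 64 : Int)
  else String.ofList [c]

def spc_encode_message_alt (message : String) (key_numbers : List Int) (formatting : List (String × Bool)) : String :=
  let encoded := message.toList.map pvEncCharB
  -- one pass over the keys: state (odd, front, back)
  let st := key_numbers.foldl
    (fun (st : Bool × List String × List String) k =>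
      if st.1 then (!st.1, st.2.1 ++ [PySem.Int.toStr k], st.2.2)
      else (!st.1, st.2.1, st.2.2 ++ [PySem.Int.toStr k]))
    ((encoded.length % 2 == 1), [], [])
  let half := encoded.length / 2   -- encoded[:half] / encoded[half:] with 0 ≤ half ≤ len: take/drop are exact
  let out := encoded.take half ++ st.2.1 ++ st.2.2.reverse ++ encoded.drop half
  let out := if (PySem.Dict.mk formatting).getD "commas" false
             then [PySem.Str.join "," out] else out
  let out := if (PySem.Dict.mk formatting).getD "periods" false
             then out ++ ["."] else out
  PySem.Str.join " " out

-- ===== PRECONDITION & SPEC =====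
def Spec_spc_encode_message (message : String) (key_numbers : List Int) (formatting : List (String × Bool)) (out : String) : Prop := out = spc_encode_message_alt message key_numbers formatting
instance (message : String) (key_numbers : List Int) (formatting : List (String × Bool)) (out : String) : Decidable (Spec_spc_encode_message message key_numbers formatting out) := by unfold Spec_spc_encode_message; infer_instance

-- ===== CLAIM (what is proved, stated in full; the proofs are below) =====
def Claim_equal_spc_encode_message : Prop := ∀ (message : String) (key_numbers : List Int) (formatting : List (String × Bool)), Dom_spc_encode_message message key_numbers formatting → Spec_spc_encode_message message key_numbers formatting (spc_encode_message message key_numbers formatting)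

-- ===== LEMMAS AND PROOFS =====

-- the shape of the middle block the insert loop builds: parity p = (current length is odd)
def pvMid (p : Bool) : List Int → List String
  | [] => []
  | k :: ks => if p then PySem.Int.toStr k :: pvMid (!p) ks
               else pvMid (!p) ks ++ [PySem.Int.toStr k]

-- A's insert-at-middle loop keeps pre and suf fixed and builds pvMid between them
lemma pvA_loop (ks : List Int) : ∀ (pre suf : List String),
    pre.length = (pre.length + suf.length) / 2 →
    ks.foldl (fun acc k => PySem.List.insert acc (PySem.Int.floordiv (acc.length : Int) 2) (PySem.Int.toStr k)) (pre ++ suf)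
      = pre ++ pvMid ((pre.length + suf.length) % 2 == 1) ks ++ suf := by
  induction ks with
  | nil => intro pre suf _; simp [pvMid]
  | cons k ks ih =>
    intro pre suf h
    have hlen : ((pre ++ suf).length : Int) = ((pre.length + suf.length : Nat) : Int) := by
      simp
    have hfd : PySem.Int.floordiv (((pre ++ suf).length : Nat) : Int) 2
        = (((pre.length + suf.length) / 2 : Nat) : Int) := by
      rw [hlen]; exact_mod_cast PySem.Int.floordiv_natCast (pre.length + suf.length) 2
    have hins : PySem.List.insert (pre ++ suf) (PySem.Int.floordiv (((pre ++ suf).length : Nat) : Int) 2) (PySem.Int.toStr k)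
        = pre ++ PySem.Int.toStr k :: suf := by
      rw [hfd, ← h]
      rw [PySem.List.insert_natCast (pre ++ suf) pre.length (PySem.Int.toStr k) (by simp)]
      simp
    simp only [List.foldl_cons, hins]
    by_cases hp : (pre.length + suf.length) % 2 = 1
    · -- odd length: the key extends the front part
      have h1 : (pre ++ [PySem.Int.toStr k]).length
          = ((pre ++ [PySem.Int.toStr k]).length + suf.length) / 2 := by
        simp; omega
      have := ih (pre ++ [PySem.Int.toStr k]) suf h1
      simp only [List.append_assoc, List.singleton_append] at this
      rw [this]
      have hp2 : ((pre ++ [PySem.Int.toStr k]).length + suf.length) % 2 = 0 := by simp; omega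
      simp only [List.length_append, List.length_singleton] at hp2
      simp [pvMid, hp, hp2]
    · -- even length: the key is pushed in front of suf (ends at the block's back)
      have h1 : pre.length = (pre.length + (PySem.Int.toStr k :: suf).length) / 2 := by
        simp; omega
      have := ih pre (PySem.Int.toStr k :: suf) h1
      rw [this]
      have hp2 : (pre.length + (suf.length + 1)) % 2 = 1 := by omega
      have hp0 : (pre.length + suf.length) % 2 = 0 := by omega
      simp [pvMid, hp0, hp2]

-- B's one-pass loop computes the same block
lemma pvB_loop (ks : List Int) : ∀ (p : Bool) (front back : List String),
    (ks.foldl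
      (fun (st : Bool × List String × List String) k =>
        if st.1 then (!st.1, st.2.1 ++ [PySem.Int.toStr k], st.2.2)
        else (!st.1, st.2.1, st.2.2 ++ [PySem.Int.toStr k]))
      (p, front, back)).2.1
    ++ ((ks.foldl
      (fun (st : Bool × List String × List String) k =>
        if st.1 then (!st.1, st.2.1 ++ [PySem.Int.toStr k], st.2.2)
        else (!st.1, st.2.1, st.2.2 ++ [PySem.Int.toStr k]))
      (p, front, back)).2.2).reverse
    = front ++ pvMid p ks ++ back.reverse := by
  induction ks with
  | nil => intro p front back; simp [pvMid]
  | cons k ks ih =>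
    intro p front back
    cases p with
    | true =>
      simp only [List.foldl_cons, pvMid]
      rw [ih]
      simp
    | false =>
      simp only [List.foldl_cons, pvMid]
      rw [if_neg (by simp)]
      rw [ih]
      simp

-- the middle phase on the already-encoded list: A's insert loop = B's two-buffer construction
lemma pv_core (enc : List String) (ks : List Int) :
    ks.foldl (fun acc k => PySem.List.insert acc (PySem.Int.floordiv (acc.length : Int) 2) (PySem.Int.toStr k)) enc
      = enc.take (enc.length / 2)
        ++ (ks.foldl
              (fun (st : Bool × List String × List String) k =>
                if st.1 then (!st.1, st.2.1 ++ [PySem.Int.toStr k], st.2.2)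
                else (!st.1, st.2.1, st.2.2 ++ [PySem.Int.toStr k]))
              ((enc.length % 2 == 1), [], [])).2.1
        ++ ((ks.foldl
              (fun (st : Bool × List String × List String) k =>
                if st.1 then (!st.1, st.2.1 ++ [PySem.Int.toStr k], st.2.2)
                else (!st.1, st.2.1, st.2.2 ++ [PySem.Int.toStr k]))
              ((enc.length % 2 == 1), [], [])).2.2).reverse
        ++ enc.drop (enc.length / 2) := by
  have hpre : (enc.take (enc.length / 2)).length
      = ((enc.take (enc.length / 2)).length + (enc.drop (enc.length / 2)).length) / 2 := by
    simp; omega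
  have hA := pvA_loop ks (enc.take (enc.length / 2)) (enc.drop (enc.length / 2)) hpre
  have hsum : (enc.take (enc.length / 2)).length + (enc.drop (enc.length / 2)).length
      = enc.length := by simp; omega
  rw [hsum, List.take_append_drop] at hA
  have hB := pvB_loop ks (enc.length % 2 == 1) [] []
  simp only [List.nil_append, List.reverse_nil, List.append_nil] at hB
  rw [hA, ← hB]
  simp [List.append_assoc]

theorem pv_main (message : String) (key_numbers : List Int) (formatting : List (String × Bool)) :
    spc_encode_message message key_numbers formatting
      = spc_encode_message_alt message key_numbers formatting := by
  unfold spc_encode_message spc_encode_message_alt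
  dsimp only
  have henc : message.toList.foldl (fun acc c => acc ++ [pvEncCharA c]) []
      = message.toList.map pvEncCharB := by
    rw [PySem.List.foldl_append_singleton_eq_map pvEncCharA message.toList []]
    rfl
  rw [henc, pv_core]

-- ===== VERDICT (by name: the statement is the Claim_ definition above) =====
theorem spc_encode_message_spec : Claim_equal_spc_encode_message := by
  intro message key_numbers formatting _
  unfold Spec_spc_encode_message
  exact pv_main message key_numbers formatting
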